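-- pv_equiv track=rewrite | github.com/pypi-data/pypi-mirror-403 | packages/abstract-utilities/abstract_utilities-0.2.2.714-py3-none-any.whl/abstract_utilities/list_utils.py | recursive_json_list
-- ===== SOURCE A (Python) =====
-- def recursive_json_list(json_list:dict,desired_values:dict)->list:
--     """
--     Filters the json list based on the desired_values.
--
--     Returns:
--     - list: A filtered json list of desired_values held within json object keys.
--     """
--     # Start with the full list of json objects
--     # For each key in the selection values, filter the list if the key's value is set
--     recursed_list=[]
--     for json_obj in json_list:
--         bool_count = 0
--         for desired_key, desired_value in desired_values.items():
--             if desired_key in json_obj: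
--                 if json_obj[desired_key] == desired_value:
--                     bool_count +=1
--                     static = desired_value
--         if bool_count == len(list(desired_values.keys())):
--             recursed_list.append(json_obj)
--     return recursed_list
-- ===== SOURCE B (Python) =====
-- def recursive_json_list(json_list: dict, desired_values: dict) -> list:
--     """Filters the json list down to the objects matching every desired key-value pair."""
--     result = list(json_list)
--     for desired_key, desired_value in desired_values.items():
--         result = [o for o in result if desired_key in o and o[desired_key] == desired_value]
--     return result
-- ===== Notes on version B (the rewrite author's own statement) =====
-- stated objective: faster
-- what changed: Transposed the loops: instead of counting per-object how many desired pairs match and comparing the count to the number of keys, B starts from the full candidate list and narrows it with one list comprehension per desired key-value pair.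
import Mathlib
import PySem

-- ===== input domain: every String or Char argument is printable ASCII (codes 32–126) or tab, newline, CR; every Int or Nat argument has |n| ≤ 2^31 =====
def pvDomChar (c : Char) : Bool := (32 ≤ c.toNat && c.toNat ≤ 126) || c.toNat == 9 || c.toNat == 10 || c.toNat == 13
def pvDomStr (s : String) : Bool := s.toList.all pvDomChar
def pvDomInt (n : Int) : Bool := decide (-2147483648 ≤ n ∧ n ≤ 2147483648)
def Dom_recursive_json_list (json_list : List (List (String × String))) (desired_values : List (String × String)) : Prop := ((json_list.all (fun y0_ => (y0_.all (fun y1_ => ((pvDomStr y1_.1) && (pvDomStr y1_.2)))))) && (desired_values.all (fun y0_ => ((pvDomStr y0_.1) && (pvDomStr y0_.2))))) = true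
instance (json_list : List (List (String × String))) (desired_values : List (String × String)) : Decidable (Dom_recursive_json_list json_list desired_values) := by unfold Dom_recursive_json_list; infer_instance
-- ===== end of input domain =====

-- B transposes A's loops: one narrowing filter pass per desired key instead of per-object match counting; simpler, same result.


-- ===== PORT A =====
-- 'desired_key in json_obj' / 'json_obj[desired_key]' : dict membership / lookup (first match) via PySem.Dict
def recursive_json_list (json_list : List (List (String × String))) (desired_values : List (String × String)) : List (List (String × String)) :=
  json_list.foldl (fun recursed_list json_obj =>
    let bool_count : Nat := desired_values.foldl (fun bool_count kv =>
      if (PySem.Dict.mk json_obj).contains kv.1 then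
        (if (PySem.Dict.mk json_obj).getD kv.1 "" == kv.2 then bool_count + 1 else bool_count)
      else bool_count) 0
    if bool_count == desired_values.length then recursed_list ++ [json_obj] else recursed_list) []

-- ===== PORT B =====
def recursive_json_list_alt (json_list : List (List (String × String))) (desired_values : List (String × String)) : List (List (String × String)) :=
  desired_values.foldl (fun result kv =>
    result.filter (fun o => (PySem.Dict.mk o).contains kv.1 && ((PySem.Dict.mk o).getD kv.1 "" == kv.2))) json_list

-- ===== PRECONDITION & SPEC =====
def Spec_recursive_json_list (json_list : List (List (String × String))) (desired_values : List (String × String)) (out : List (List (String × String))) : Prop := out = recursive_json_list_alt json_list desired_values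
instance (json_list : List (List (String × String))) (desired_values : List (String × String)) (out : List (List (String × String))) : Decidable (Spec_recursive_json_list json_list desired_values out) := by unfold Spec_recursive_json_list; infer_instance

-- ===== CLAIM (what is proved, stated in full; the proofs are below) =====
def Claim_equal_recursive_json_list : Prop := ∀ (json_list : List (List (String × String))) (desired_values : List (String × String)), Dom_recursive_json_list json_list desired_values → Spec_recursive_json_list json_list desired_values (recursive_json_list json_list desired_values)

-- ===== LEMMAS AND PROOFS =====

-- the per-pair match predicate both programs test
def pvMatch (o : List (String × String)) (kv : String × String) : Bool :=
  (PySem.Dict.mk o).contains kv.1 && ((PySem.Dict.mk o).getD kv.1 "" == kv.2)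

-- A's inner loop counts the matching pairs
theorem countA_eq (o : List (String × String)) (dv : List (String × String)) (c : Nat) :
    dv.foldl (fun bool_count kv =>
      if (PySem.Dict.mk o).contains kv.1 then
        (if (PySem.Dict.mk o).getD kv.1 "" == kv.2 then bool_count + 1 else bool_count)
      else bool_count) c = c + dv.countP (pvMatch o) := by
  induction dv generalizing c with
  | nil => simp
  | cons kv rest ih =>
    rw [List.foldl_cons, ih]
    simp only [List.countP_cons, pvMatch]
    by_cases h1 : (PySem.Dict.mk o).contains kv.1 = true
    · by_cases h2 : ((PySem.Dict.mk o).getD kv.1 "" == kv.2) = true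
      · rw [if_pos h1, if_pos h2]; simp [h1, h2]; omega
      · rw [if_pos h1, if_neg h2]; simp [h1, h2]
    · rw [if_neg h1]
      simp only [Bool.not_eq_true] at h1
      simp [h1]

-- A's keep condition = "every desired pair matches"
theorem keepA_eq (o : List (String × String)) (dv : List (String × String)) :
    (dv.countP (pvMatch o) == dv.length) = dv.all (pvMatch o) := by
  by_cases h : dv.all (pvMatch o) = true
  · rw [h, List.countP_eq_length.2 (List.all_eq_true.1 h), beq_self_eq_true]
  · have hf : dv.all (pvMatch o) = false := Bool.not_eq_true _ |>.mp h
    rw [hf]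
    have hne : dv.countP (pvMatch o) ≠ dv.length := by
      intro he
      exact h (List.all_eq_true.2 (List.countP_eq_length.1 he))
    simp [hne]

-- A's outer append-if loop is a filter
theorem foldA_eq (jl : List (List (String × String))) (dv : List (String × String))
    (acc : List (List (String × String))) :
    jl.foldl (fun recursed_list json_obj =>
      if dv.countP (pvMatch json_obj) == dv.length then recursed_list ++ [json_obj] else recursed_list) acc
      = acc ++ jl.filter (fun o => dv.all (pvMatch o)) := by
  induction jl generalizing acc with
  | nil => simp
  | cons o rest ih =>
    rw [List.foldl_cons, ih, List.filter_cons]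
    by_cases h : dv.all (pvMatch o) = true
    · rw [keepA_eq] at *
      simp [h]
    · have h' : (dv.countP (pvMatch o) == dv.length) = false := by
        rw [keepA_eq]; exact Bool.not_eq_true _ |>.mp h
      simp [h', h]

-- B's narrowing loop is a filter of the conjunction
theorem foldB_eq (dv : List (String × String)) (jl : List (List (String × String))) :
    dv.foldl (fun result kv => result.filter (fun o => pvMatch o kv)) jl
      = jl.filter (fun o => dv.all (pvMatch o)) := by
  induction dv generalizing jl with
  | nil => simp
  | cons kv rest ih =>
    rw [List.foldl_cons, ih, List.filter_filter]
    congr 1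
    funext o
    simp [Bool.and_comm]

-- ===== VERDICT (by name: the statement is the Claim_ definition above) =====
theorem recursive_json_list_spec : Claim_equal_recursive_json_list := by
  intro jl dv _
  unfold Spec_recursive_json_list recursive_json_list recursive_json_list_alt
  have hA :
      jl.foldl (fun recursed_list json_obj =>
        let bool_count : Nat := dv.foldl (fun bool_count kv =>
          if (PySem.Dict.mk json_obj).contains kv.1 then
            (if (PySem.Dict.mk json_obj).getD kv.1 "" == kv.2 then bool_count + 1 else bool_count)
          else bool_count) 0
        if bool_count == dv.length then recursed_list ++ [json_obj] else recursed_list) []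
        = jl.filter (fun o => dv.all (pvMatch o)) := by
    have := foldA_eq jl dv []
    simp only [List.nil_append] at this
    rw [← this]
    congr 1
    funext acc o
    simp only [countA_eq, Nat.zero_add]
  rw [hA, ← foldB_eq]
  rfl
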